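-- pv_equiv track=rewrite | github.com/wyx770927314/GitHubProjects | practiceProject/shishi.py | shixiangshigedashabi
-- ===== SOURCE A (Python) =====
-- def shixiangshigedashabi(list):
--     sum = 0
--     jishu_sum = 0
--     for i in list:
--         sum += i
--     for index, value in enumerate(list):
--         if index % 2 == 0:
--             jishu_sum += value
--     if sum - jishu_sum > jishu_sum:
--         return sum - jishu_sum
--     else:
--         return jishu_sum
-- ===== SOURCE B (Python) =====
-- def shixiangshigedashabi(list):
--     # One pass: split the elements into even-index / odd-index sums with a
--     # toggled flag (no total, no enumerate, no index arithmetic), then take the max.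
--     even = 0
--     odd = 0
--     at_even = True
--     for x in list:
--         if at_even:
--             even += x
--         else:
--             odd += x
--         at_even = not at_even
--     return max(even, odd)
-- ===== Notes on version B (the rewrite author's own statement) =====
-- stated objective: simpler
-- what changed: B makes a single pass that accumulates the even-index and odd-index sums directly via a toggled flag and returns max(even, odd), instead of A's two passes (total sum plus an enumerate/modulo pass for the even-index sum) and the explicit total-minus-even comparison.
import Mathlib
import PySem

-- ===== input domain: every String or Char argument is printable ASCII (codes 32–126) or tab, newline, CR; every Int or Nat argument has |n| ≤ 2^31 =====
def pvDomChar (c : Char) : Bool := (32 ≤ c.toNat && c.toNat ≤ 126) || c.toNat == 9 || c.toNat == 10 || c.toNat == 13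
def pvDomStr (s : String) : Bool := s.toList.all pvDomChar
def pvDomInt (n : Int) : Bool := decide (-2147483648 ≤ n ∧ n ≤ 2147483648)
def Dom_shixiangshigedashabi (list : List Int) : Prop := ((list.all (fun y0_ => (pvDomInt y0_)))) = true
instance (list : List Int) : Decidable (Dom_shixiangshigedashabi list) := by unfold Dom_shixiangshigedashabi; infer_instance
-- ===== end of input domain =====

-- B replaces A's two passes (total sum + enumerate/modulo even-index pass and the
-- total-minus-even comparison) with one pass accumulating even/odd-index sums via a
-- toggled flag, returning max(even, odd); objective: simpler.

-- ===== PORT A =====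
-- enumerate indices start at 0 and stay nonnegative, so Lean's `% 2 = 0` on Int
-- coincides with Python's `index % 2 == 0` here.
def shixiangshigedashabi (list : List Int) : Int :=
  let sum := list.foldl (fun s i => s + i) 0
  let jishu_sum := (PySem.List.enumerate list 0).foldl
    (fun j p => if p.1 % 2 = 0 then j + p.2 else j) 0
  if sum - jishu_sum > jishu_sum then sum - jishu_sum else jishu_sum

-- ===== PORT B =====
def shixiangshigedashabi_alt (list : List Int) : Int :=
  let r := list.foldl
    (fun (st : Int × Int × Bool) x =>
      if st.2.2 then (st.1 + x, st.2.1, !st.2.2) else (st.1, st.2.1 + x, !st.2.2))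
    (0, 0, true)
  max r.1 r.2.1

-- ===== PRECONDITION & SPEC =====
def Spec_shixiangshigedashabi (list : List Int) (out : Int) : Prop := out = shixiangshigedashabi_alt list
instance (list : List Int) (out : Int) : Decidable (Spec_shixiangshigedashabi list out) := by unfold Spec_shixiangshigedashabi; infer_instance

-- ===== CLAIM (what is proved, stated in full; the proofs are below) =====
def Claim_equal_shixiangshigedashabi : Prop := ∀ (list : List Int), Dom_shixiangshigedashabi list → Spec_shixiangshigedashabi list (shixiangshigedashabi list)

-- ===== LEMMAS AND PROOFS =====

-- B's loop step, named for the lemmas below.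
def pvBStep (st : Int × Int × Bool) (x : Int) : Int × Int × Bool :=
  if st.2.2 then (st.1 + x, st.2.1, !st.2.2) else (st.1, st.2.1 + x, !st.2.2)

lemma pvBStep_eq :
    (fun (st : Int × Int × Bool) (x : Int) =>
      if st.2.2 then (st.1 + x, st.2.1, !st.2.2) else (st.1, st.2.1 + x, !st.2.2)) = pvBStep := rfl

lemma pvBStep_true (e o x : Int) : pvBStep (e, o, true) x = (e + x, o, false) := by
  simp [pvBStep]

lemma pvBStep_false (e o x : Int) : pvBStep (e, o, false) x = (e, o + x, true) := by
  simp [pvBStep]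

lemma pvFoldlAdd (ys : List Int) : ∀ (a b : Int),
    ys.foldl (fun a i => a + i) (a + b) = a + ys.foldl (fun a i => a + i) b := by
  induction ys with
  | nil => intro a b; simp
  | cons y ys ihy =>
    intro a b
    simp only [List.foldl_cons]
    rw [show a + b + y = a + (b + y) by ring, ihy]

-- Main invariant: running A's enumerate fold from start index s and B's fold from
-- (e, o, s even) in parallel: A's fold collects exactly the even-absolute-index
-- elements (the growth of B's first component), and B's two components together
-- grow by the plain sum of the list.
lemma pvKey (l : List Int) : ∀ (s j e o : Int), 0 ≤ s →
    (PySem.List.enumerate l s).foldl (fun j p => if p.1 % 2 = 0 then j + p.2 else j) j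
      = j + ((l.foldl pvBStep (e, o, decide (s % 2 = 0))).1 - e)
    ∧ (l.foldl pvBStep (e, o, decide (s % 2 = 0))).1
        + (l.foldl pvBStep (e, o, decide (s % 2 = 0))).2.1
      = e + o + l.foldl (fun a i => a + i) 0 := by
  induction l with
  | nil => intro s j e o _; simp [PySem.List.enumerate_nil]
  | cons x xs ih =>
    intro s j e o hs
    rw [PySem.List.enumerate_cons]
    simp only [List.foldl_cons]
    rw [show (0 : Int) + x = x + 0 by ring, pvFoldlAdd xs x 0]
    by_cases h : s % 2 = 0
    · have h1 : ¬ ((s + 1) % 2 = 0) := by omega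
      rw [if_pos h, show (decide (s % 2 = 0)) = true by simp [h], pvBStep_true,
        show (false : Bool) = decide ((s + 1) % 2 = 0) by simp [h1]]
      have ihx := ih (s + 1) (j + x) (e + x) o (by omega)
      refine ⟨?_, ?_⟩
      · rw [ihx.1]; ring
      · rw [ihx.2]; ring
    · have h1 : (s + 1) % 2 = 0 := by omega
      rw [if_neg h, show (decide (s % 2 = 0)) = false by simp [h], pvBStep_false,
        show (true : Bool) = decide ((s + 1) % 2 = 0) by simp [h1]]
      have ihx := ih (s + 1) j e (o + x) (by omega)
      refine ⟨?_, ?_⟩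
      · rw [ihx.1]
      · rw [ihx.2]; ring

-- ===== VERDICT (by name: the statement is the Claim_ definition above) =====
theorem shixiangshigedashabi_spec : Claim_equal_shixiangshigedashabi := by
  intro l _
  unfold Spec_shixiangshigedashabi shixiangshigedashabi shixiangshigedashabi_alt
  rw [pvBStep_eq]
  have h := pvKey l 0 0 0 0 (le_refl 0)
  simp only [show decide ((0 : Int) % 2 = 0) = true by decide] at h
  set r := l.foldl pvBStep (0, 0, true) with hr
  obtain ⟨h1, h2⟩ := h
  simp only [zero_add, sub_zero, add_zero] at h1 h2
  show (if (l.foldl (fun s i => s + i) 0)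
          - ((PySem.List.enumerate l 0).foldl (fun j p => if p.1 % 2 = 0 then j + p.2 else j) 0)
          > ((PySem.List.enumerate l 0).foldl (fun j p => if p.1 % 2 = 0 then j + p.2 else j) 0)
        then (l.foldl (fun s i => s + i) 0)
          - ((PySem.List.enumerate l 0).foldl (fun j p => if p.1 % 2 = 0 then j + p.2 else j) 0)
        else ((PySem.List.enumerate l 0).foldl (fun j p => if p.1 % 2 = 0 then j + p.2 else j) 0))
      = max r.1 r.2.1
  rw [h1]
  have hsum : l.foldl (fun s i => s + i) 0 = r.1 + r.2.1 := h2.symm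
  rw [hsum]
  rcases le_or_gt r.2.1 r.1 with hle | hlt
  · rw [max_eq_left hle]; split_ifs with hc <;> omega
  · rw [max_eq_right (le_of_lt hlt)]; split_ifs with hc <;> omega
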